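-- pv_equiv track=rewrite | github.com/ahkjeflhkeuvha/programers | 프로그래머스/1/135808. 과일 장수/과일 장수.py | solution
-- ===== SOURCE A (Python) =====
-- def solution(k, m, score):
--     answer = 0
--     score.sort(reverse=True)
--     idx = m-1
--
--     while idx < len(score):
--         answer += score[idx] * m
--         idx += m
--
--     return answer
-- ===== SOURCE B (Python) =====
-- def solution(k, m, score):
--     # Run-length approach: count occurrences, walk distinct scores in descending
--     # order, and count how many group-min positions fall inside each run arithmetically.
--     counts = {}
--     for s in score:
--         counts[s] = counts.get(s, 0) + 1
--     answer = 0
--     pos = 0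
--     for v in sorted(counts, reverse=True):
--         c = counts[v]
--         answer += v * m * ((pos + c) // m - pos // m)
--         pos += c
--     return answer
-- ===== Notes on version B (the rewrite author's own statement) =====
-- stated objective: alternative
-- what changed: B replaces the sort of the whole list plus the index-stepping while loop by a run-length approach: count occurrences in a dict, walk the distinct scores in descending order, and for each run compute arithmetically (via two floor divisions) how many group-min positions land inside it.
import Mathlib
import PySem

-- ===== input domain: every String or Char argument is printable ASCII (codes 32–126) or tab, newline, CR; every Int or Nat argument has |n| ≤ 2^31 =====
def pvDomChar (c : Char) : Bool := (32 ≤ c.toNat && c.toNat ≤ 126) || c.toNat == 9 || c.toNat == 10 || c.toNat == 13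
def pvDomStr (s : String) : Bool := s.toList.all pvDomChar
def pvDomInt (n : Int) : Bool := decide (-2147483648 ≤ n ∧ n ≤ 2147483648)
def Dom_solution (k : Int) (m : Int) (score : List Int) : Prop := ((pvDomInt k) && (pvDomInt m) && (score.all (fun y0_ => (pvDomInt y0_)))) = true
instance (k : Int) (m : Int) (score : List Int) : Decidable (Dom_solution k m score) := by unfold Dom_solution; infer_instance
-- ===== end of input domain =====

-- B replaces the sort-then-step-by-m loop by a run-length count over distinct scores (alternative
-- decomposition, no speed claim). A sorts `score` in place; the equivalence is about the return value only.

-- ===== PORT A =====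
/-- The `while idx < len(score)` loop of A; fuel bounds the iterations (enough inside Pre_). -/
def solutionLoop (sc : List Int) (m : Int) : Nat → Int → Int → Int
  | 0, _, acc => acc
  | fuel+1, idx, acc =>
    if idx < (sc.length : Int) then
      solutionLoop sc m fuel (idx + m) (acc + ((PySem.List.pyGet? sc idx).getD 0) * m)
    else acc

def solution (k : Int) (m : Int) (score : List Int) : Int :=
  let sc := PySem.List.sorted score (fun x => x) true
  solutionLoop sc m (sc.length + 1) (m - 1) 0

-- ===== PORT B =====
def solution_alt (k : Int) (m : Int) (score : List Int) : Int :=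
  let counts := score.foldl (fun d s => d.insert s (d.getD s 0 + 1)) PySem.Dict.empty
  let ks := PySem.List.sorted counts.keys (fun x => x) true
  (ks.foldl (fun (st : Int × Int) v =>
      let c := counts.getD v 0
      (st.1 + c,
       st.2 + v * m * (PySem.Int.floordiv (st.1 + c) m - PySem.Int.floordiv st.1 m)))
    ((0 : Int), (0 : Int))).2

-- ===== PRECONDITION & SPEC =====
-- Pre_ excludes m ≤ 0, where Python A never returns: for m = 0 the loop never advances
-- (infinite loop, or IndexError on empty score); for m < 0 the index walks down past -len (IndexError).
def Pre_solution (k : Int) (m : Int) (score : List Int) : Prop := 1 ≤ m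
instance (k : Int) (m : Int) (score : List Int) : Decidable (Pre_solution k m score) := by
  unfold Pre_solution; infer_instance

def pvWitness_solution : Int × Int × List Int := (4, 2, [1, 2, 3, 1, 2])

def Spec_solution (k : Int) (m : Int) (score : List Int) (out : Int) : Prop := out = solution_alt k m score
instance (k : Int) (m : Int) (score : List Int) (out : Int) : Decidable (Spec_solution k m score out) := by unfold Spec_solution; infer_instance

-- ===== CLAIM (what is proved, stated in full; the proofs are below) =====
def Claim_equal_solution : Prop := ∀ (k : Int) (m : Int) (score : List Int), Dom_solution k m score → Pre_solution k m score → Spec_solution k m score (solution k m score)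

-- ===== LEMMAS AND PROOFS =====

/-- Sum of the elements whose global position q (list sitting at offset p) has (q+1) % m = 0. -/
def Tsum (mm : Nat) : List Int → Nat → Int
  | [], _ => 0
  | x :: xs, p => (if (p + 1) % mm = 0 then x else 0) + Tsum mm xs (p + 1)

theorem Tsum_append (mm : Nat) (l1 l2 : List Int) : ∀ p,
    Tsum mm (l1 ++ l2) p = Tsum mm l1 p + Tsum mm l2 (p + l1.length) := by
  induction l1 with
  | nil => intro p; simp [Tsum]
  | cons x xs ih =>
    intro p
    simp only [List.cons_append, Tsum, List.length_cons, ih (p + 1)]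
    rw [show p + 1 + xs.length = p + (xs.length + 1) by omega]
    ring

theorem Tsum_replicate (mm : Nat) (hm : 1 ≤ mm) (v : Int) : ∀ (c p : Nat),
    Tsum mm (List.replicate c v) p = v * ((((p + c) / mm : Nat) : Int) - ((p / mm : Nat) : Int)) := by
  intro c
  induction c with
  | zero => intro p; simp [Tsum]
  | succ c ih =>
    intro p
    rw [List.replicate_succ]
    simp only [Tsum, ih (p + 1)]
    have hsucc : (p + 1) / mm = p / mm + if mm ∣ (p + 1) then 1 else 0 := Nat.succ_div
    have harr : p + 1 + c = p + (c + 1) := by omega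
    rw [harr]
    split_ifs with h
    · have hd : mm ∣ (p + 1) := Nat.dvd_of_mod_eq_zero h
      rw [hsucc, if_pos hd]
      push_cast
      ring
    · have hd : ¬ mm ∣ (p + 1) := fun hc => h (Nat.eq_zero_of_dvd_of_lt hc |> fun _ => Nat.mod_eq_zero_of_dvd hc)
      rw [hsucc, if_neg hd]
      push_cast
      ring

theorem Tsum_zero_stretch (mm : Nat) : ∀ (j q : Nat) (L : List Int),
    (∀ i, i < j → (q + i + 1) % mm ≠ 0) →
    Tsum mm (L.drop q) q = Tsum mm (L.drop (q + j)) (q + j) := by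
  intro j
  induction j with
  | zero => intro q L _; rfl
  | succ j ih =>
    intro q L hcond
    by_cases hq : q < L.length
    · rw [List.drop_eq_getElem_cons hq]
      simp only [Tsum]
      rw [if_neg (by have := hcond 0 (by omega); simpa using this)]
      rw [ih (q + 1) L (fun i hi => by
        have := hcond (i + 1) (by omega)
        rw [show q + 1 + i + 1 = q + (i + 1) + 1 by omega]; exact this)]
      rw [show q + 1 + j = q + (j + 1) by omega]
      ring
    · rw [List.drop_eq_nil_of_le (by omega), List.drop_eq_nil_of_le (by omega)]
      simp [Tsum]

theorem Tsum_step (mm : Nat) (hm : 1 ≤ mm) (L : List Int) (p : Nat)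
    (hp : (p + 1) % mm = 0) (hlt : p < L.length) :
    Tsum mm (L.drop p) p = L[p] + Tsum mm (L.drop (p + mm)) (p + mm) := by
  rw [List.drop_eq_getElem_cons hlt]
  simp only [Tsum, if_pos hp]
  obtain ⟨t, ht⟩ : mm ∣ (p + 1) := Nat.dvd_of_mod_eq_zero hp
  rw [Tsum_zero_stretch mm (mm - 1) (p + 1) L (fun i hi => by
    rw [show p + 1 + i + 1 = mm * t + (i + 1) by omega, Nat.mul_add_mod,
      Nat.mod_eq_of_lt (by omega)]
    omega)]
  rw [show p + 1 + (mm - 1) = p + mm by omega]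

theorem solutionLoop_eq_Tsum (L : List Int) (mm : Nat) (hm : 1 ≤ mm) :
    ∀ (fuel p : Nat) (acc : Int), L.length ≤ p + fuel → (p + 1) % mm = 0 →
      solutionLoop L (mm : Int) fuel (p : Int) acc = acc + (mm : Int) * Tsum mm (L.drop p) p := by
  intro fuel
  induction fuel with
  | zero =>
    intro p acc hlen _
    rw [List.drop_eq_nil_of_le (by omega)]
    simp [solutionLoop, Tsum]
  | succ fuel ih =>
    intro p acc hlen hp
    by_cases hq : p < L.length
    · rw [solutionLoop, if_pos (by exact_mod_cast hq)]
      have hget : (PySem.List.pyGet? L (p : Int)).getD 0 = L[p] := by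
        rw [PySem.List.pyGet?_natCast]
        simp [List.getElem?_eq_getElem hq]
      have hcast : (p : Int) + (mm : Int) = ((p + mm : Nat) : Int) := by push_cast; ring
      rw [hget, hcast, ih (p + mm) _ (by omega)
        (by rw [show p + mm + 1 = (p + 1) + mm by omega, Nat.add_mod_right, hp])]
      rw [Tsum_step mm hm L p hp hq]
      ring
    · rw [solutionLoop, if_neg (by exact_mod_cast hq)]
      rw [List.drop_eq_nil_of_le (by omega)]
      simp [Tsum]

/-- The expansion of the run-length representation over a list of distinct values. -/
def expandRuns (score : List Int) (ks : List Int) : List Int :=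
  ks.flatMap (fun v => List.replicate (score.count v) v)

theorem foldB_eq_Tsum (score : List Int) (mm : Nat) (hm : 1 ≤ mm) :
    ∀ (ks : List Int) (p : Nat) (ans : Int),
      (ks.foldl (fun (st : Int × Int) v =>
          (st.1 + ((score.count v : Nat) : Int),
           st.2 + v * (mm : Int) * (PySem.Int.floordiv (st.1 + ((score.count v : Nat) : Int)) (mm : Int)
             - PySem.Int.floordiv st.1 (mm : Int))))
        (((p : Nat) : Int), ans)).2
      = ans + (mm : Int) * Tsum mm (expandRuns score ks) p := by
  intro ks
  induction ks with
  | nil => intro p ans; simp [expandRuns, Tsum]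
  | cons v vs ih =>
    intro p ans
    simp only [List.foldl_cons]
    have hc : ((p : Nat) : Int) + ((score.count v : Nat) : Int)
        = ((p + score.count v : Nat) : Int) := by push_cast; ring
    rw [hc, ih (p + score.count v)]
    have hexp : expandRuns score (v :: vs) =
        List.replicate (score.count v) v ++ expandRuns score vs := by
      simp [expandRuns]
    rw [hexp, Tsum_append, List.length_replicate, Tsum_replicate mm hm v]
    have hmpos : (0 : Int) < (mm : Int) := by exact_mod_cast hm
    rw [show PySem.Int.floordiv ((p + score.count v : Nat) : Int) ((mm : Nat) : Int)
        = (((p + score.count v) / mm : Nat) : Int) from PySem.Int.floordiv_natCast _ _]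
    rw [show PySem.Int.floordiv ((p : Nat) : Int) ((mm : Nat) : Int)
        = ((p / mm : Nat) : Int) from PySem.Int.floordiv_natCast _ _]
    ring

theorem count_expandRuns (score : List Int) : ∀ (ks : List Int), ks.Nodup → ∀ x,
    (expandRuns score ks).count x = if x ∈ ks then score.count x else 0 := by
  intro ks
  induction ks with
  | nil => intro _ x; simp [expandRuns]
  | cons v vs ih =>
    intro hnd x
    rw [List.nodup_cons] at hnd
    obtain ⟨hvn, hnd'⟩ := hnd
    have hexp : expandRuns score (v :: vs) =
        List.replicate (score.count v) v ++ expandRuns score vs := by simp [expandRuns]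
    rw [hexp, List.count_append, List.count_replicate, ih hnd' x]
    by_cases hx : x = v
    · subst hx
      simp [hvn]
    · simp [hx, Ne.symm hx]

theorem pairwise_ge_expandRuns (score : List Int) : ∀ (ks : List Int),
    ks.Pairwise (fun a b => b < a) →
    (expandRuns score ks).Pairwise (fun a b : Int => b ≤ a) := by
  intro ks
  induction ks with
  | nil => intro _; simp [expandRuns]
  | cons v vs ih =>
    intro hp
    rcases List.pairwise_cons.mp hp with ⟨hv, hp'⟩
    have hexp : expandRuns score (v :: vs) =
        List.replicate (score.count v) v ++ expandRuns score vs := by simp [expandRuns]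
    rw [hexp, List.pairwise_append]
    refine ⟨List.pairwise_replicate.mpr (Or.inr le_rfl), ih hp', ?_⟩
    intro a ha b hb
    obtain rfl := List.eq_of_mem_replicate ha
    simp only [expandRuns] at hb
    obtain ⟨w, hw, hbw⟩ := List.mem_flatMap.mp hb
    obtain rfl := List.eq_of_mem_replicate hbw
    exact le_of_lt (hv _ hw)

theorem expandRuns_eq_sorted (score : List Int) :
    expandRuns score (PySem.List.sorted (PySem.Set.ofList score) (fun x => x) true)
      = PySem.List.sorted score (fun x => x) true := by
  set ks := PySem.List.sorted (PySem.Set.ofList score) (fun x => x) true with hks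
  have hperm_ks : ks.Perm (PySem.Set.ofList score) := PySem.List.sorted_perm _ _ _
  have hnd : ks.Nodup := hperm_ks.nodup_iff.mpr (PySem.Set.nodup_ofList score)
  have hmem_ks : ∀ x, x ∈ ks ↔ x ∈ score := by
    intro x
    rw [hperm_ks.mem_iff]
    exact PySem.Set.mem_ofList score x
  have hge : ks.Pairwise (fun a b : Int => b ≤ a) := by
    have := PySem.List.sorted_pairwise_rev (PySem.Set.ofList score) (fun x : Int => x)
    simpa using this
  have hstrict : ks.Pairwise (fun a b : Int => b < a) := by
    have hne : ks.Pairwise (fun a b : Int => a ≠ b) := hnd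
    exact (hge.and hne).imp (fun h => lt_of_le_of_ne h.1 (Ne.symm h.2))
  set L := PySem.List.sorted score (fun x => x) true with hL
  have hpermL : L.Perm score := PySem.List.sorted_perm _ _ _
  have hpermE : (expandRuns score ks).Perm score := by
    rw [List.perm_iff_count]
    intro x
    rw [count_expandRuns score ks hnd x]
    by_cases hx : x ∈ score
    · rw [if_pos ((hmem_ks x).mpr hx)]
    · rw [if_neg (fun h => hx ((hmem_ks x).mp h))]
      exact (List.count_eq_zero.mpr hx).symm
  have hsortedE : (expandRuns score ks).Pairwise (fun a b : Int => b ≤ a) :=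
    pairwise_ge_expandRuns score ks hstrict
  have hsortedL : L.Pairwise (fun a b : Int => b ≤ a) := by
    have := PySem.List.sorted_pairwise_rev score (fun x : Int => x)
    simpa using this
  exact List.Perm.eq_of_pairwise
    (fun a b _ _ h1 h2 => le_antisymm h2 h1) hsortedE hsortedL
    (hpermE.trans hpermL.symm)

-- ===== VERDICT (by name: the statement is the Claim_ definition above) =====
theorem solution_spec : Claim_equal_solution := by
  intro k m score _ hpre
  unfold Pre_solution at hpre
  unfold Spec_solution
  simp only [solution, solution_alt]
  obtain ⟨mm, rfl⟩ : ∃ mm : Nat, m = (mm : Int) :=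
    ⟨m.toNat, (Int.toNat_of_nonneg (le_trans Int.one_nonneg hpre)).symm⟩
  have hm : 1 ≤ mm := by exact_mod_cast hpre
  -- B side: the dict is the counter, its keys the distinct values
  rw [PySem.Dict.foldl_insert_getD_add_one_eq_counter, PySem.Dict.keys_counter]
  rw [PySem.List.foldl_congr_mem _ _
    (fun (st : Int × Int) v =>
      (st.1 + ((score.count v : Nat) : Int),
       st.2 + v * (mm : Int) * (PySem.Int.floordiv (st.1 + ((score.count v : Nat) : Int)) (mm : Int)
         - PySem.Int.floordiv st.1 (mm : Int))))
    ((0 : Int), (0 : Int))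
    (fun st v _ => by rw [PySem.Dict.getD_counter])]
  have h0 : ((0 : Int), (0 : Int)) = ((((0 : Nat) : Int)), (0 : Int)) := rfl
  rw [h0, foldB_eq_Tsum score mm hm _ 0 0]
  rw [expandRuns_eq_sorted score]
  -- A side: the fuelled loop sums every m-th element of the sorted list
  set L := PySem.List.sorted score (fun x => x) true with hL
  have hstart : (mm : Int) - 1 = ((mm - 1 : Nat) : Int) := by
    have h1 : 1 ≤ mm := hm
    push_cast [h1]
    ring
  rw [hstart, solutionLoop_eq_Tsum L mm hm (L.length + 1) (mm - 1) 0 (by omega)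
    (by rw [show mm - 1 + 1 = mm by omega, Nat.mod_self])]
  have hz := Tsum_zero_stretch mm (mm - 1) 0 L (fun i hi => by
    rw [Nat.zero_add, Nat.mod_eq_of_lt (by omega)]
    omega)
  simp only [Nat.zero_add, List.drop_zero] at hz
  rw [← hz]
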